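-- pv_equiv track=rewrite | github.com/gotlibsh/aoc2023 | solution/10_alt.py | get_lines_by_phrase
-- ===== SOURCE A (Python) =====
-- def get_lines_by_phrase(lines, phrase):
--     start = -1
--
--     for i,line in enumerate(lines):
--         if line.startswith(phrase):
--             start = i+1
--             continue
--
--         if start != -1:
--             if line == '\n':
--                 return lines[start:i]
--             elif i == len(lines) - 1:
--                 return lines[start:]
-- ===== SOURCE B (Python) =====
-- def get_lines_by_phrase(lines, phrase):
--     collecting = False
--     result = []
--     for line in lines:
--         if line.startswith(phrase):
--             collecting = True
--             result = []
--         elif collecting: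
--             if line == '\n':
--                 return result
--             result.append(line)
--     return result if result else None
-- ===== Notes on version B (the rewrite author's own statement) =====
-- stated objective: simpler
-- what changed: Replaced the enumerate/start-sentinel scan that re-slices the whole list by index with a direct single-pass accumulator: a collecting flag plus a result list grown line by line, with no indices, no len-1 test and no slicing.
import Mathlib
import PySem

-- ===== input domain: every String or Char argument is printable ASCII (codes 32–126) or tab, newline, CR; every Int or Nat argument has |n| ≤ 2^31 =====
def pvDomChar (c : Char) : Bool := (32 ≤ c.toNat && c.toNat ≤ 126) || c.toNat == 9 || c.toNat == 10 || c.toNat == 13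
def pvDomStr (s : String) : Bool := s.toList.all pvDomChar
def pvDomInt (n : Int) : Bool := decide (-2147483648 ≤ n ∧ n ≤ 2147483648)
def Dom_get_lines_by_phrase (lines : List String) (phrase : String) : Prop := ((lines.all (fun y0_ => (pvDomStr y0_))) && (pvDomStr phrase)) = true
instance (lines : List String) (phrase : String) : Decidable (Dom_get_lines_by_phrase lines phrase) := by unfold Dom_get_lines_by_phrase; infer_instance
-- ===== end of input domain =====

-- B replaces A's index/sentinel scan with slicing by a flag + accumulator single pass (simpler, same cost).

-- ===== PORT A =====
-- literal port of A's loop: i is the enumerate index, start the -1 sentinel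
def goA (all : List String) (phrase : String) : List String → Nat → Int → Option (List String)
  | [], _, _ => none
  | line :: rest, i, start =>
    if PySem.Str.startswith line phrase then
      goA all phrase rest (i+1) ((i : Int) + 1)
    else if start ≠ -1 then
      if line = "\n" then some (PySem.List.slice all (some start) (some (i : Int)))
      else if i = all.length - 1 then some (PySem.List.slice all (some start) none)
      else goA all phrase rest (i+1) start
    else goA all phrase rest (i+1) start

def get_lines_by_phrase (lines : List String) (phrase : String) : Option (List String) :=
  goA lines phrase lines 0 (-1)

-- ===== PORT B =====
-- literal port of B's loop: collecting flag + accumulated result, 'return result if result else None' at the end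
def goB (phrase : String) : List String → Bool → List String → Option (List String)
  | [], _, result => if result.isEmpty then none else some result
  | line :: rest, collecting, result =>
    if PySem.Str.startswith line phrase then goB phrase rest true []
    else if collecting then
      if line = "\n" then some result
      else goB phrase rest collecting (result ++ [line])
    else goB phrase rest collecting result

def get_lines_by_phrase_alt (lines : List String) (phrase : String) : Option (List String) :=
  goB phrase lines false []

-- ===== PRECONDITION & SPEC =====
def Spec_get_lines_by_phrase (lines : List String) (phrase : String) (out : Option (List String)) : Prop := out = get_lines_by_phrase_alt lines phrase
instance (lines : List String) (phrase : String) (out : Option (List String)) : Decidable (Spec_get_lines_by_phrase lines phrase out) := by unfold Spec_get_lines_by_phrase; infer_instance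

-- ===== CLAIM (what is proved, stated in full; the proofs are below) =====
def Claim_equal_get_lines_by_phrase : Prop := ∀ (lines : List String) (phrase : String), Dom_get_lines_by_phrase lines phrase → Spec_get_lines_by_phrase lines phrase (get_lines_by_phrase lines phrase)

-- ===== LEMMAS AND PROOFS =====

theorem take_snoc (all : List String) (line : String) (rest' : List String) (i s : Nat)
    (h1 : all.drop i = line :: rest') (hs : s ≤ i) :
    (all.drop s).take (i - s) ++ [line] = (all.drop s).take (i - s + 1) := by
  have hline : all[i]? = some line := by
    have h0 : (all.drop i)[0]? = some line := by rw [h1]; rfl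
    simpa [List.getElem?_drop] using h0
  have hget : (all.drop s)[i - s]? = some line := by
    rw [List.getElem?_drop]
    have hsi : s + (i - s) = i := by omega
    rw [hsi]; exact hline
  rw [List.take_add_one, hget]
  simp

theorem goA_eq_goB_collecting (all : List String) (phrase : String) :
    ∀ (rest : List String) (i s : Nat), rest = all.drop i → s ≤ i → i ≤ all.length →
      (rest = [] → s = all.length) →
      goA all phrase rest i (s : Int) = goB phrase rest true ((all.drop s).take (i - s)) := by
  intro rest
  induction rest with
  | nil =>
    intro i s h1 h2 h3 h4
    have hs : s = all.length := h4 rfl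
    simp [goA, goB, hs]
  | cons line rest' ih =>
    intro i s h1 h2 h3 h4
    have h1' : all.drop i = line :: rest' := h1.symm
    have hlen : i < all.length := by
      by_contra h
      have : all.drop i = [] := List.drop_eq_nil_of_le (by omega)
      rw [this] at h1'; exact absurd h1' (by simp)
    have hdrop' : rest' = all.drop (i + 1) := by
      have h : all.drop (i + 1) = (all.drop i).drop 1 := by rw [List.drop_drop]
      rw [h, h1']; simp
    have hne : ((s : Int) ≠ -1) := by omega
    have htail : rest' = [] → all.length ≤ i + 1 := by
      intro h
      have := List.drop_eq_nil_iff.mp (hdrop' ▸ h)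
      omega
    by_cases hph : PySem.Str.startswith line phrase
    · have hcast : ((i : Int) + 1) = ((i + 1 : Nat) : Int) := by push_cast; ring
      have hih := ih (i + 1) (i + 1) hdrop' (le_refl _) (by omega)
        (fun h => by have := htail h; omega)
      simp only [goA, goB, hph, if_true, hcast]
      simpa using hih
    · simp only [goA, goB, hph, Bool.false_eq_true, ite_false, ne_eq, hne,
        not_false_eq_true, ite_true]
      by_cases hnl : line = "\n"
      · simp [hnl, PySem.List.slice_natCast]
      · rw [if_neg hnl, if_neg hnl]
        by_cases hlast : i = all.length - 1
        · rw [if_pos hlast]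
          have hrest' : rest' = [] := by
            rw [hdrop']; exact List.drop_eq_nil_of_le (by omega)
          subst hrest'
          have hsnoc := take_snoc all line [] i s h1' h2
          simp only [goB]
          rw [PySem.List.slice_from_natCast, hsnoc]
          have htake : (all.drop s).take (i - s + 1) = all.drop s := by
            have hlen2 : i - s + 1 = all.length - s := by omega
            rw [hlen2]
            have hl : (all.drop s).length ≤ all.length - s := by
              rw [List.length_drop]
            exact List.take_of_length_le hl
          rw [htake]
          have hnonempty : (all.drop s).isEmpty = false := by
            simp [List.isEmpty_eq_false_iff, List.drop_eq_nil_iff]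
            omega
          rw [hnonempty]
          rfl
        · rw [if_neg hlast]
          have hih := ih (i + 1) s hdrop' (by omega) (by omega)
            (fun h => by have := htail h; omega)
          have hsnoc := take_snoc all line rest' i s h1' h2
          rw [hsnoc]
          have harith : i - s + 1 = i + 1 - s := by omega
          rw [harith]
          exact hih

theorem goA_eq_goB_idle (all : List String) (phrase : String) :
    ∀ (rest : List String) (i : Nat), rest = all.drop i → i ≤ all.length →
      goA all phrase rest i (-1) = goB phrase rest false [] := by
  intro rest
  induction rest with
  | nil => intro i h1 h2; simp [goA, goB]
  | cons line rest' ih =>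
    intro i h1 h2
    have h1' : all.drop i = line :: rest' := h1.symm
    have hlen : i < all.length := by
      by_contra h
      have : all.drop i = [] := List.drop_eq_nil_of_le (by omega)
      rw [this] at h1'; exact absurd h1' (by simp)
    have hdrop' : rest' = all.drop (i + 1) := by
      have h : all.drop (i + 1) = (all.drop i).drop 1 := by rw [List.drop_drop]
      rw [h, h1']; simp
    by_cases hph : PySem.Str.startswith line phrase
    · have hcast : ((i : Int) + 1) = ((i + 1 : Nat) : Int) := by push_cast; ring
      have hih := goA_eq_goB_collecting all phrase rest' (i + 1) (i + 1) hdrop' (le_refl _)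
        (by omega)
        (fun h => by
          have := List.drop_eq_nil_iff.mp (hdrop' ▸ h)
          omega)
      simp only [goA, goB, hph, if_true, hcast]
      simpa using hih
    · simp only [goA, goB, hph, Bool.false_eq_true, ite_false]
      norm_num
      exact ih (i + 1) hdrop' (by omega)

-- ===== VERDICT (by name: the statement is the Claim_ definition above) =====
theorem get_lines_by_phrase_spec : Claim_equal_get_lines_by_phrase := by
  intro lines phrase _
  unfold Spec_get_lines_by_phrase get_lines_by_phrase get_lines_by_phrase_alt
  exact goA_eq_goB_idle lines phrase lines 0 (by simp) (by simp)
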